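-- pv_equiv track=rewrite | github.com/Acid37/Neo-notice_injector | actions/emoji_like.py | _sort_emotion_tags_by_priority
-- ===== SOURCE A (Python) =====
-- def _sort_emotion_tags_by_priority(
--     emotion_tags: list[str],
--     priority_tags: list[str],
-- ) -> list[str]:
--     """根据优先级对标签排序，未声明优先级的保持原始相对顺序。"""
--     priority_index = {tag: idx for idx, tag in enumerate(priority_tags)}
--     fallback_base = len(priority_index)
--
--     return sorted(
--         emotion_tags,
--         key=lambda item: (priority_index.get(item, fallback_base), emotion_tags.index(item)),
--     )
-- ===== SOURCE B (Python) =====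
-- def _sort_emotion_tags_by_priority(
--     emotion_tags: list[str],
--     priority_tags: list[str],
-- ) -> list[str]:
--     """Bucket the tags by priority in one grouping pass instead of comparison-sorting."""
--     priority_index = {tag: idx for idx, tag in enumerate(priority_tags)}
--     fallback = len(priority_index)
--     buckets = [[] for _ in range(len(priority_tags) + 1)]
--     for tag in dict.fromkeys(emotion_tags):  # distinct tags, first-occurrence order
--         buckets[priority_index.get(tag, fallback)].extend([tag] * emotion_tags.count(tag))
--     return [tag for bucket in buckets for tag in bucket]
-- ===== Notes on version B (the rewrite author's own statement) =====
-- stated objective: alternative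
-- what changed: B replaces A's stable comparison sort with a composite (priority, first-index) key by a single grouping pass that distributes the distinct tags into priority buckets (unknowns in the last bucket) and flattens the buckets with each tag repeated by its multiplicity.
import Mathlib
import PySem

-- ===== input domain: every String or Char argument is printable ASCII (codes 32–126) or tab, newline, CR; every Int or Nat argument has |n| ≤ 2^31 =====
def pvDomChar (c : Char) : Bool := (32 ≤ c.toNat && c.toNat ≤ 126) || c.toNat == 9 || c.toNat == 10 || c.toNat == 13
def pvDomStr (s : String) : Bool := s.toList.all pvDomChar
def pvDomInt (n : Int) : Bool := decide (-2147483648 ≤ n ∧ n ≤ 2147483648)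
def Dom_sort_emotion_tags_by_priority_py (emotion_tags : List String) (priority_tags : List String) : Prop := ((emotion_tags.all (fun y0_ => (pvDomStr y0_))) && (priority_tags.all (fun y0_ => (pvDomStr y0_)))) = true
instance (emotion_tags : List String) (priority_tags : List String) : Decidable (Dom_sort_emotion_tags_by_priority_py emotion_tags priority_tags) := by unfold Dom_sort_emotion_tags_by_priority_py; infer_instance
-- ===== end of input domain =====

-- B replaces A's comparison sort (tuple key of priority and first index) by a one-pass
-- bucket grouping over the distinct tags; equivalence of return values is proved below.


-- ===== PORT A =====
-- Literal port of A: build {tag: idx} from enumerate(priority_tags), then stable-sort by the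
-- tuple key (priority_index.get(item, fallback_base), emotion_tags.index(item)).
-- emotion_tags.index(item) is applied only to members of emotion_tags, where index? is `some`;
-- the `.getD 0` default is never used.
def sort_emotion_tags_by_priority_py (emotion_tags : List String) (priority_tags : List String) : List String :=
  let priority_index : PySem.Dict String Int :=
    (PySem.List.enumerate priority_tags 0).foldl (fun d p => d.insert p.2 p.1) PySem.Dict.empty
  let fallback_base : Int := (priority_index.size : Int)
  PySem.List.sorted2 emotion_tags
    (fun item => priority_index.getD item fallback_base)
    (fun item => ((PySem.List.index? emotion_tags item).getD 0 : Nat))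
    false

-- ===== PORT B =====
-- buckets[i].extend(chunk) — append chunk to the i-th list
def pvAppendAt : List (List String) → Nat → List String → List (List String)
  | [], _, _ => []
  | b :: bs, 0, chunk => (b ++ chunk) :: bs
  | b :: bs, Nat.succ n, chunk => b :: pvAppendAt bs n chunk

-- Literal port of B (bucket grouping): the bucket index priority_index.get(tag, fallback) is an
-- enumerate index or the dict size, hence ≥ 0, so `.toNat` is exact here.
def sort_emotion_tags_by_priority_py_alt (emotion_tags : List String) (priority_tags : List String) : List String :=
  let priority_index : PySem.Dict String Int :=
    (PySem.List.enumerate priority_tags 0).foldl (fun d p => d.insert p.2 p.1) PySem.Dict.empty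
  let fallback : Int := (priority_index.size : Int)
  let buckets0 : List (List String) := List.replicate (priority_tags.length + 1) []
  let buckets :=
    (PySem.List.dedup emotion_tags).foldl
      (fun bs tag =>
        pvAppendAt bs (priority_index.getD tag fallback).toNat
          (List.replicate (PySem.List.count emotion_tags tag) tag))
      buckets0
  buckets.flatMap (fun b => b)

-- ===== PRECONDITION & SPEC =====
def Spec_sort_emotion_tags_by_priority_py (emotion_tags : List String) (priority_tags : List String) (out : List String) : Prop := out = sort_emotion_tags_by_priority_py_alt emotion_tags priority_tags
instance (emotion_tags : List String) (priority_tags : List String) (out : List String) : Decidable (Spec_sort_emotion_tags_by_priority_py emotion_tags priority_tags out) := by unfold Spec_sort_emotion_tags_by_priority_py; infer_instance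

-- ===== CLAIM (what is proved, stated in full; the proofs are below) =====
def Claim_equal_sort_emotion_tags_by_priority_py : Prop := ∀ (emotion_tags : List String) (priority_tags : List String), Dom_sort_emotion_tags_by_priority_py emotion_tags priority_tags → Spec_sort_emotion_tags_by_priority_py emotion_tags priority_tags (sort_emotion_tags_by_priority_py emotion_tags priority_tags)

-- ===== LEMMAS AND PROOFS =====

-- Abbreviations for the pieces both ports share.
def pvDict (ps : List String) : PySem.Dict String Int :=
  (PySem.List.enumerate ps 0).foldl (fun d p => d.insert p.2 p.1) PySem.Dict.empty

def pvK1 (ps : List String) (t : String) : Int :=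
  (pvDict ps).getD t ((pvDict ps).size : Int)

def pvK2 (xs : List String) (t : String) : Nat :=
  (PySem.List.index? xs t).getD 0

-- scalar encoding of the lexicographic tuple key
def pvKey (xs ps : List String) (t : String) : Nat :=
  (pvK1 ps t).toNat * (xs.length + 1) + pvK2 xs t

def pvBucket (xs ps : List String) (j : Nat) : List String :=
  ((PySem.List.dedup xs).filter (fun t => (pvK1 ps t).toNat == j)).flatMap
    (fun t => List.replicate (PySem.List.count xs t) t)

-- ---- bounds on the keys ----
lemma pv_values_foldl (l : List (Int × String)) :
    ∀ (d : PySem.Dict String Int) (w : Int),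
      w ∈ (l.foldl (fun d p => d.insert p.2 p.1) d).values → w ∈ d.values ∨ ∃ p ∈ l, w = p.1 := by
  
  induction l with
  | nil => intro d w h; exact Or.inl h
  | cons p l ih =>
    intro d w h
    simp only [List.foldl_cons] at h
    rcases ih _ w h with h' | ⟨q, hq, rfl⟩
    · rcases PySem.Dict.mem_values_insert _ _ _ _ h' with rfl | h''
      · exact Or.inr ⟨p, List.mem_cons_self, rfl⟩
      · exact Or.inl h''
    · exact Or.inr ⟨q, List.mem_cons_of_mem _ hq, rfl⟩

lemma pv_size_foldl (l : List (Int × String)) :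
    ∀ (d : PySem.Dict String Int),
      (l.foldl (fun d p => d.insert p.2 p.1) d).size ≤ d.size + l.length := by
  
  have hstep : ∀ (d : PySem.Dict String Int) (k : String) (v : Int),
      (d.insert k v).size ≤ d.size + 1 := by
    intro d k v
    by_cases hc : d.contains k
    · simp [PySem.Dict.size, PySem.Dict.items_insert, hc]
    · simp [PySem.Dict.size, PySem.Dict.items_insert, hc]
  induction l with
  | nil => intro d; simp
  | cons p l ih =>
    intro d
    simp only [List.foldl_cons, List.length_cons]
    have h1 := ih (d.insert p.2 p.1)
    have h2 := hstep d p.2 p.1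
    omega

lemma pvK1_bound (ps : List String) (t : String) :
    0 ≤ pvK1 ps t ∧ pvK1 ps t ≤ (ps.length : Int) := by
  
  have hsz : (pvDict ps).size ≤ ps.length := by
    have h := pv_size_foldl (PySem.List.enumerate ps 0) PySem.Dict.empty
    have hlen : (PySem.List.enumerate ps 0).length = ps.length :=
      PySem.List.length_enumerate _ _
    simpa [pvDict, PySem.Dict.size, PySem.Dict.empty, hlen] using h
  unfold pvK1
  rw [PySem.Dict.getD_eq_get?_getD]
  cases hg : (pvDict ps).get? t with
  | none =>
    simp only [Option.getD_none]
    omega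
  | some v =>
    simp only [Option.getD_some]
    have hmem : (t, v) ∈ (pvDict ps).items := PySem.Dict.mem_items_of_get?_eq_some _ hg
    have hv : v ∈ (pvDict ps).values := by
      simp only [PySem.Dict.values]
      exact List.mem_map.mpr ⟨(t, v), hmem, rfl⟩
    rcases pv_values_foldl (PySem.List.enumerate ps 0) PySem.Dict.empty v hv with h0 | ⟨p, hp, rfl⟩
    · simp [PySem.Dict.empty, PySem.Dict.values] at h0
    · obtain ⟨k, hk, rfl⟩ := (PySem.List.mem_enumerate_iff _ _ _).mp hp
      simp only [zero_add]
      omega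

lemma pvK2_bound (xs : List String) (t : String) : pvK2 xs t ≤ xs.length := by
  
  unfold pvK2
  cases h : PySem.List.index? xs t with
  | none => simp
  | some k =>
    obtain ⟨hk, -, -⟩ := PySem.List.getElem_of_index?_eq_some h
    simp only [Option.getD_some]
    omega

lemma pvK2_inj (xs : List String) {a b : String} (ha : a ∈ xs) (hb : b ∈ xs)
    (h : pvK2 xs a = pvK2 xs b) : a = b := by
  
  have hsa : (PySem.List.index? xs a).isSome := (PySem.List.index?_isSome_iff _ _).mpr ha
  have hsb : (PySem.List.index? xs b).isSome := (PySem.List.index?_isSome_iff _ _).mpr hb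
  obtain ⟨ka, hka⟩ := Option.isSome_iff_exists.mp hsa
  obtain ⟨kb, hkb⟩ := Option.isSome_iff_exists.mp hsb
  unfold pvK2 at h
  rw [hka, hkb] at h
  simp only [Option.getD_some] at h
  subst h
  obtain ⟨h1, h2, -⟩ := PySem.List.getElem_of_index?_eq_some hka
  obtain ⟨h3, h4, -⟩ := PySem.List.getElem_of_index?_eq_some hkb
  rw [← h2, ← h4]

lemma pvKey_inj (xs ps : List String) {a b : String} (ha : a ∈ xs) (hb : b ∈ xs)
    (h : pvKey xs ps a = pvKey xs ps b) : a = b := by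
  
  have ha2 := pvK2_bound xs a
  have hb2 := pvK2_bound xs b
  unfold pvKey at h
  have hk2 : pvK2 xs a = pvK2 xs b := by
    rcases Nat.lt_trichotomy (pvK1 ps a).toNat (pvK1 ps b).toNat with hx | hx | hx
    · exfalso
      have h2 : ((pvK1 ps a).toNat + 1) * (xs.length + 1) ≤ (pvK1 ps b).toNat * (xs.length + 1) :=
        Nat.mul_le_mul_right _ hx
      have h3 : ((pvK1 ps a).toNat + 1) * (xs.length + 1)
          = (pvK1 ps a).toNat * (xs.length + 1) + (xs.length + 1) := by ring
      omega
    · rw [hx] at h; omega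
    · exfalso
      have h2 : ((pvK1 ps b).toNat + 1) * (xs.length + 1) ≤ (pvK1 ps a).toNat * (xs.length + 1) :=
        Nat.mul_le_mul_right _ hx
      have h3 : ((pvK1 ps b).toNat + 1) * (xs.length + 1)
          = (pvK1 ps b).toNat * (xs.length + 1) + (xs.length + 1) := by ring
      omega
  exact pvK2_inj xs ha hb hk2

lemma pv_enc_lt (N x y p q : Nat) (hp : p ≤ N) (hq : q ≤ N) :
    x * (N + 1) + p < y * (N + 1) + q ↔ (x < y ∨ (x = y ∧ p < q)) := by
  constructor
  · intro h
    rcases Nat.lt_trichotomy x y with h' | h' | h'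
    · exact Or.inl h'
    · exact Or.inr ⟨h', by subst h'; omega⟩
    · exfalso
      have h2 : (y + 1) * (N + 1) ≤ x * (N + 1) := Nat.mul_le_mul_right _ h'
      have h3 : (y + 1) * (N + 1) = y * (N + 1) + (N + 1) := by ring
      omega
  · intro h
    rcases h with h' | ⟨rfl, h'⟩
    · have h2 : (x + 1) * (N + 1) ≤ y * (N + 1) := Nat.mul_le_mul_right _ h'
      have h3 : (x + 1) * (N + 1) = x * (N + 1) + (N + 1) := by ring
      omega
    · omega

-- ---- shape of port A: the tuple comparator equals the scalar-key comparator ----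
lemma pv_cmp_eq (xs ps : List String) (a b : String) :
    (decide (pvK1 ps a < pvK1 ps b) ||
      (!decide (pvK1 ps b < pvK1 ps a) && decide (pvK2 xs a < pvK2 xs b)))
      = decide (pvKey xs ps a < pvKey xs ps b) := by
  
  have ha1 := pvK1_bound ps a
  have hb1 := pvK1_bound ps b
  have ha2 := pvK2_bound xs a
  have hb2 := pvK2_bound xs b
  have hlex := pv_enc_lt xs.length (pvK1 ps a).toNat (pvK1 ps b).toNat
    (pvK2 xs a) (pvK2 xs b) ha2 hb2
  unfold pvKey
  by_cases h1 : pvK1 ps a < pvK1 ps b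
  · have hx : (pvK1 ps a).toNat < (pvK1 ps b).toNat := by omega
    simp only [h1, decide_true, Bool.true_or]
    exact (decide_eq_true (hlex.mpr (Or.inl hx))).symm
  · by_cases h2 : pvK1 ps b < pvK1 ps a
    · have hx : (pvK1 ps b).toNat < (pvK1 ps a).toNat := by omega
      simp only [h1, h2, decide_true, decide_false, Bool.not_true, Bool.false_and,
        Bool.false_or]
      have hn : ¬ ((pvK1 ps a).toNat * (xs.length + 1) + pvK2 xs a
          < (pvK1 ps b).toNat * (xs.length + 1) + pvK2 xs b) := by
        intro hk
        rcases hlex.mp hk with h' | ⟨h', -⟩ <;> omega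
      exact (decide_eq_false hn).symm
    · have hx : (pvK1 ps a).toNat = (pvK1 ps b).toNat := by omega
      simp only [h1, h2, decide_false, Bool.not_false, Bool.true_and, Bool.false_or]
      rw [decide_eq_decide, hlex]
      omega

lemma pvA_shape (xs ps : List String) :
    sort_emotion_tags_by_priority_py xs ps = PySem.List.sorted xs (pvKey xs ps) false := by
  
  show PySem.List.sorted2 xs (fun t => pvK1 ps t) (fun t => pvK2 xs t) false = _
  show xs.foldl (fun acc x => PySem.List.insertBy
      (fun a b => decide (pvK1 ps a < pvK1 ps b) ||
        (!decide (pvK1 ps b < pvK1 ps a) && decide (pvK2 xs a < pvK2 xs b))) x acc) [] =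
    xs.foldl (fun acc x => PySem.List.insertBy
      (fun a b => decide (pvKey xs ps a < pvKey xs ps b)) x acc) []
  have h : (fun a b => decide (pvK1 ps a < pvK1 ps b) ||
        (!decide (pvK1 ps b < pvK1 ps a) && decide (pvK2 xs a < pvK2 xs b)))
      = (fun a b => decide (pvKey xs ps a < pvKey xs ps b)) :=
    funext fun a => funext fun b => pv_cmp_eq xs ps a b
  rw [h]

-- ---- shape of port B: the bucket fold flattens to a flatMap over bucket indices ----
lemma pvAppendAt_length (bs : List (List String)) (i : Nat) (c : List String) :
    (pvAppendAt bs i c).length = bs.length := by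
  induction bs generalizing i with
  | nil => rfl
  | cons b bs ih =>
    cases i with
    | zero => rfl
    | succ n => simp [pvAppendAt, ih]

lemma pvAppendAt_getD (bs : List (List String)) (i : Nat) (c : List String)
    (j : Nat) (hj : j < bs.length) :
    (pvAppendAt bs i c).getD j [] = if j = i then bs.getD j [] ++ c else bs.getD j [] := by
  induction bs generalizing i j with
  | nil => simp at hj
  | cons b bs ih =>
    cases i with
    | zero =>
      cases j with
      | zero => simp [pvAppendAt]
      | succ m => simp [pvAppendAt]
    | succ n =>
      cases j with
      | zero => simp [pvAppendAt]
      | succ m =>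
        simp only [pvAppendAt, List.getD_cons_succ]
        rw [ih n m (by simpa using hj)]
        simp [Nat.add_right_cancel_iff]

lemma pv_foldl_appendAt (f : String → Nat) (g : String → List String) (l : List String) :
    ∀ (bs : List (List String)), (∀ t ∈ l, f t < bs.length) →
      (l.foldl (fun bs t => pvAppendAt bs (f t) (g t)) bs).length = bs.length ∧
      ∀ (j : Nat), j < bs.length →
        (l.foldl (fun bs t => pvAppendAt bs (f t) (g t)) bs).getD j [] =
          bs.getD j [] ++ (l.filter (fun t => f t == j)).flatMap g := by
  induction l with
  | nil => intro bs _; exact ⟨rfl, by intro j hj; simp⟩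
  | cons t l ih =>
    intro bs h
    have hlen : (pvAppendAt bs (f t) (g t)).length = bs.length := pvAppendAt_length _ _ _
    have h' : ∀ u ∈ l, f u < (pvAppendAt bs (f t) (g t)).length := by
      intro u hu; rw [hlen]; exact h u (List.mem_cons_of_mem _ hu)
    obtain ⟨ihl, ihg⟩ := ih (pvAppendAt bs (f t) (g t)) h'
    refine ⟨by simp only [List.foldl_cons]; rw [ihl, hlen], ?_⟩
    intro j hj
    simp only [List.foldl_cons]
    rw [ihg j (by rw [hlen]; exact hj), pvAppendAt_getD bs (f t) (g t) j hj]
    by_cases hfj : f t = j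
    · subst hfj
      simp
    · simp [hfj, Ne.symm hfj]

lemma pv_flatMap_id (bs : List (List String)) :
    bs.flatMap (fun b => b) = (List.range bs.length).flatMap (fun j => bs.getD j []) := by
  
  induction bs with
  | nil => rfl
  | cons b bs ih =>
    simp only [List.flatMap_cons, List.length_cons, List.range_succ_eq_map,
      List.getD_cons_zero, List.flatMap_map, List.getD_cons_succ] at *
    rw [ih]

lemma pvB_shape (xs ps : List String) :
    sort_emotion_tags_by_priority_py_alt xs ps =
      (List.range (ps.length + 1)).flatMap (pvBucket xs ps) := by
  
  have hbound : ∀ t ∈ PySem.List.dedup xs,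
      (pvK1 ps t).toNat < (List.replicate (ps.length + 1) ([] : List String)).length := by
    intro t _
    have := pvK1_bound ps t
    simp only [List.length_replicate]
    omega
  obtain ⟨hl, hg⟩ := pv_foldl_appendAt (fun t => (pvK1 ps t).toNat)
    (fun t => List.replicate (PySem.List.count xs t) t) (PySem.List.dedup xs)
    (List.replicate (ps.length + 1) []) hbound
  show ((PySem.List.dedup xs).foldl
      (fun bs tag => pvAppendAt bs (pvK1 ps tag).toNat
        (List.replicate (PySem.List.count xs tag) tag))
      (List.replicate (ps.length + 1) [])).flatMap (fun b => b) = _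
  rw [pv_flatMap_id]
  rw [hl]
  simp only [List.length_replicate]
  rw [List.flatMap_def, List.flatMap_def]
  apply congrArg List.flatten
  apply List.map_congr_left
  intro j hj
  have hjlt : j < ps.length + 1 := List.mem_range.mp hj
  rw [hg j (by simpa using hjlt)]
  rw [List.getD_replicate _ hjlt]
  rw [List.nil_append]
  rfl

-- ---- B's value is a permutation of xs ----
lemma pv_sum_ite {α : Type} [DecidableEq α] (l : List α) (v : α) (c : α → Nat)
    (hnd : l.Nodup) :
    (l.map (fun t => if t = v then c t else 0)).sum = if v ∈ l then c v else 0 := by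
  
  induction l with
  | nil => simp
  | cons a l ih =>
    obtain ⟨hna, hnd'⟩ := List.nodup_cons.mp hnd
    simp only [List.map_cons, List.sum_cons, ih hnd', List.mem_cons]
    by_cases hav : a = v
    · subst hav
      simp [hna]
    · simp [hav, Ne.symm hav]

lemma pv_perm (xs ps : List String) :
    ((List.range (ps.length + 1)).flatMap (pvBucket xs ps)).Perm xs := by
  
  rw [List.perm_iff_count]
  intro v
  have hcb : ∀ j, (pvBucket xs ps j).count v =
      if v ∈ (PySem.List.dedup xs).filter (fun t => (pvK1 ps t).toNat == j)
      then List.count v xs else 0 := by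
    intro j
    unfold pvBucket
    rw [List.flatMap_def, List.count_flatten, List.map_map]
    have hmap : ((PySem.List.dedup xs).filter (fun t => (pvK1 ps t).toNat == j)).map
          ((List.count v) ∘ fun t => List.replicate (PySem.List.count xs t) t)
        = ((PySem.List.dedup xs).filter (fun t => (pvK1 ps t).toNat == j)).map
          (fun t => if t = v then List.count v xs else 0) := by
      apply List.map_congr_left
      intro t _
      simp only [Function.comp_apply, List.count_replicate, PySem.List.count_eq]
      by_cases htv : t = v
      · subst htv; simp
      · simp [htv]
    rw [hmap]
    exact pv_sum_ite _ v _ ((PySem.List.nodup_dedup xs).filter _)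
  rw [List.flatMap_def, List.count_flatten, List.map_map]
  have hmap2 : (List.range (ps.length + 1)).map ((List.count v) ∘ pvBucket xs ps)
      = (List.range (ps.length + 1)).map
        (fun j => if j = (pvK1 ps v).toNat
          then (if v ∈ PySem.List.dedup xs then List.count v xs else 0) else 0) := by
    apply List.map_congr_left
    intro j _
    simp only [Function.comp_apply, hcb j, List.mem_filter]
    rcases eq_or_ne (pvK1 ps v).toNat j with h2 | h2
    · simp [h2]
    · simp [h2, Ne.symm h2]
  rw [hmap2, pv_sum_ite _ _ _ (List.nodup_range)]
  have hlt : (pvK1 ps v).toNat < ps.length + 1 := by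
    have := pvK1_bound ps v
    omega
  simp only [List.mem_range, hlt, if_true]
  by_cases hv : v ∈ xs
  · simp [hv]
  · simp [hv, List.count_eq_zero.mpr hv]

-- ---- B's value is sorted by pvKey ----
lemma pv_pairwise_flatMap {α β : Type} (R : β → β → Prop) (l : List α) (f : α → List β)
    (h1 : ∀ a ∈ l, (f a).Pairwise R)
    (h2 : l.Pairwise (fun a b => ∀ x ∈ f a, ∀ y ∈ f b, R x y)) :
    (l.flatMap f).Pairwise R := by
  
  revert h1 h2
  induction l with
  | nil => intro _ _; simp
  | cons a l ih =>
    intro h1 h2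
    simp only [List.flatMap_cons]
    rw [List.pairwise_append]
    refine ⟨h1 a List.mem_cons_self,
      ih (fun b hb => h1 b (List.mem_cons_of_mem _ hb)) (List.pairwise_cons.mp h2).2, ?_⟩
    intro x hx y hy
    obtain ⟨b, hb, hyb⟩ := List.mem_flatMap.mp hy
    exact (List.pairwise_cons.mp h2).1 b hb x hx y hyb

lemma pvK2_cons_self (x : String) (xs : List String) : pvK2 (x :: xs) x = 0 := by
  unfold pvK2
  rw [PySem.List.index?_cons_self]
  rfl

lemma pvK2_cons_of_ne (x b : String) (xs : List String) (hxb : x ≠ b) (hb : b ∈ xs) :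
    pvK2 (x :: xs) b = pvK2 xs b + 1 := by
  have hs : (PySem.List.index? xs b).isSome := (PySem.List.index?_isSome_iff _ _).mpr hb
  obtain ⟨k, hk⟩ := Option.isSome_iff_exists.mp hs
  unfold pvK2
  rw [PySem.List.index?_cons_of_ne xs hxb, hk]
  simp

lemma pv_dedup_pairwise (xs : List String) :
    (PySem.List.dedup xs).Pairwise (fun a b => pvK2 xs a < pvK2 xs b) := by
  
  induction xs with
  | nil => simp [PySem.List.dedup_eq_ofList, PySem.Set.ofList_nil]
  | cons x xs ih =>
    rw [PySem.List.dedup_eq_ofList, PySem.Set.ofList_cons]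
    apply List.pairwise_cons.mpr
    constructor
    · intro b hb
      have hbm : b ∈ PySem.Set.ofList xs ∧ ¬ b = x := by
        simpa [PySem.Set.discard, List.mem_filter] using hb
      have hbxs : b ∈ xs := (PySem.Set.mem_ofList _ _).mp hbm.1
      show pvK2 (x :: xs) x < pvK2 (x :: xs) b
      rw [pvK2_cons_self, pvK2_cons_of_ne x b xs (fun h => hbm.2 h.symm) hbxs]
      omega
    · have hp := List.Pairwise.filter (fun y => !(y == x)) ih
      rw [PySem.List.dedup_eq_ofList] at hp
      simp only [PySem.Set.discard]
      refine List.Pairwise.imp_of_mem ?_ hp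
      intro a b hma hmb hab
      show pvK2 (x :: xs) a < pvK2 (x :: xs) b
      have hax : a ∈ PySem.Set.ofList xs ∧ ¬ a = x := by
        simpa [PySem.Set.discard, List.mem_filter] using hma
      have hbx : b ∈ PySem.Set.ofList xs ∧ ¬ b = x := by
        simpa [PySem.Set.discard, List.mem_filter] using hmb
      rw [pvK2_cons_of_ne x a xs (fun h => hax.2 h.symm) ((PySem.Set.mem_ofList _ _).mp hax.1),
        pvK2_cons_of_ne x b xs (fun h => hbx.2 h.symm) ((PySem.Set.mem_ofList _ _).mp hbx.1)]
      omega

lemma pv_pairwise (xs ps : List String) :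
    ((List.range (ps.length + 1)).flatMap (pvBucket xs ps)).Pairwise
      (fun a b => pvKey xs ps a ≤ pvKey xs ps b) := by
  
  apply pv_pairwise_flatMap
  · intro j _
    unfold pvBucket
    apply pv_pairwise_flatMap
    · intro t _
      exact (List.pairwise_replicate).mpr (Or.inr (le_refl _))
    · have hp := (List.Pairwise.filter (fun t => (pvK1 ps t).toNat == j))
        (pv_dedup_pairwise xs)
      refine List.Pairwise.imp_of_mem ?_ hp
      intro a b hma hmb hab x hx y hy
      have hxa := List.eq_of_mem_replicate hx
      have hyb := List.eq_of_mem_replicate hy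
      rw [hxa, hyb]
      have hja : (pvK1 ps a).toNat = j := by
        have := (List.mem_filter.mp hma).2; simpa using this
      have hjb : (pvK1 ps b).toNat = j := by
        have := (List.mem_filter.mp hmb).2; simpa using this
      unfold pvKey
      rw [hja, hjb]
      exact Nat.add_le_add_left (Nat.le_of_lt hab) _
  · refine List.Pairwise.imp_of_mem ?_ (List.pairwise_lt_range)
    intro j j' hmj hmj' hjj x hx y hy
    obtain ⟨t, htf, hxt⟩ := List.mem_flatMap.mp hx
    obtain ⟨u, huf, hyu⟩ := List.mem_flatMap.mp hy
    have hxa := List.eq_of_mem_replicate hxt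
    have hyb := List.eq_of_mem_replicate hyu
    rw [hxa, hyb]
    have hjt : (pvK1 ps t).toNat = j := by
      have := (List.mem_filter.mp htf).2; simpa using this
    have hju : (pvK1 ps u).toNat = j' := by
      have := (List.mem_filter.mp huf).2; simpa using this
    have h2t := pvK2_bound xs t
    have h2u := pvK2_bound xs u
    unfold pvKey
    exact Nat.le_of_lt ((pv_enc_lt xs.length _ _ _ _ h2t h2u).mpr
      (Or.inl (by rw [hjt, hju]; exact hjj)))

-- ---- uniqueness of a key-sorted permutation when the key is injective on the members ----
lemma pv_sorted_unique (K : String → Nat) (s : List String)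
    (hinj : ∀ a ∈ s, ∀ b ∈ s, K a = K b → a = b) :
    ∀ (l₁ l₂ : List String), l₁.Perm l₂ → l₁ ⊆ s →
      l₁.Pairwise (fun a b => K a ≤ K b) → l₂.Pairwise (fun a b => K a ≤ K b) → l₁ = l₂ := by
  intro l₁
  induction l₁ with
  | nil =>
    intro l₂ hp _ _ _
    exact (List.Perm.nil_eq hp)
  | cons a t₁ ih =>
    intro l₂ hp hsub hp1 hp2
    cases l₂ with
    | nil =>
      have := hp.length_eq
      simp at this
    | cons b t₂ =>
      have hab : a = b := by
        by_contra hne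
        have hain : a ∈ b :: t₂ := hp.subset List.mem_cons_self
        have hbin : b ∈ a :: t₁ := hp.symm.subset List.mem_cons_self
        have ha2 : a ∈ t₂ := by
          rcases List.mem_cons.mp hain with h | h
          · exact absurd h hne
          · exact h
        have hb1 : b ∈ t₁ := by
          rcases List.mem_cons.mp hbin with h | h
          · exact absurd h.symm hne
          · exact h
        have h1 : K a ≤ K b := (List.pairwise_cons.mp hp1).1 b hb1
        have h2 : K b ≤ K a := (List.pairwise_cons.mp hp2).1 a ha2
        exact hne (hinj a (hsub List.mem_cons_self) b
          (hsub (List.mem_cons_of_mem _ hb1)) (Nat.le_antisymm h1 h2))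
      subst hab
      have htail := ih t₂ hp.cons_inv (fun x hx => hsub (List.mem_cons_of_mem _ hx))
        (List.pairwise_cons.mp hp1).2 (List.pairwise_cons.mp hp2).2
      rw [htail]

-- ===== VERDICT (by name: the statement is the Claim_ definition above) =====
theorem sort_emotion_tags_by_priority_py_spec : Claim_equal_sort_emotion_tags_by_priority_py := by
  intro xs ps _
  show _ = _
  rw [pvA_shape, pvB_shape]
  apply pv_sorted_unique (pvKey xs ps) xs (fun a ha b hb h => pvKey_inj xs ps ha hb h)
  · exact (PySem.List.sorted_perm xs (pvKey xs ps) false).trans (pv_perm xs ps).symm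
  · intro t ht
    exact (PySem.List.mem_sorted _ _ _ _).mp ht
  · exact PySem.List.sorted_pairwise xs (pvKey xs ps)
  · exact pv_pairwise xs ps
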